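-- pv_equiv track=rewrite | github.com/MCW-UPS-CSA/M1-Security | Cipher/cipher.py | Vigenere_getCountFactors
-- ===== SOURCE A (Python) =====
-- def Vigenere_getCountFactors(factors):
--     #factors = [(factor),2,2,2,3,3,3,4,4,6,6,6,6...]
--     factorFreq = []
--     alreadyParsed = []
--     for item in factors:
--         if item not in alreadyParsed:
--             alreadyParsed.append(item)
--             localFreq = 0
--             for compare in factors:
--                 if item == compare:
--                     localFreq += 1
--             factorFreq.append([item,localFreq])
--     #factorFreq = [[(factor),(occurence)],[3,3],[4,2],[6,4]...]
--     return factorFreq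
-- ===== SOURCE B (Python) =====
-- def Vigenere_getCountFactors(factors):
--     # Peel off one distinct value per round: count its occurrences in the
--     # remaining list, then drop all of them before the next round.
--     out = []
--     rest = factors
--     while rest:
--         k = rest[0]
--         out.append([k, len([y for y in rest if y == k])])
--         rest = [y for y in rest if y != k]
--     return out
-- ===== Notes on version B (the rewrite author's own statement) =====
-- stated objective: alternative
-- what changed: Replaces A's seen-list membership test plus full rescan per distinct item with a peel-off loop: take the head of the remaining list, count and remove all its occurrences, repeat on the shrinking remainder (no alreadyParsed list, no membership test).
import Mathlib
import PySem

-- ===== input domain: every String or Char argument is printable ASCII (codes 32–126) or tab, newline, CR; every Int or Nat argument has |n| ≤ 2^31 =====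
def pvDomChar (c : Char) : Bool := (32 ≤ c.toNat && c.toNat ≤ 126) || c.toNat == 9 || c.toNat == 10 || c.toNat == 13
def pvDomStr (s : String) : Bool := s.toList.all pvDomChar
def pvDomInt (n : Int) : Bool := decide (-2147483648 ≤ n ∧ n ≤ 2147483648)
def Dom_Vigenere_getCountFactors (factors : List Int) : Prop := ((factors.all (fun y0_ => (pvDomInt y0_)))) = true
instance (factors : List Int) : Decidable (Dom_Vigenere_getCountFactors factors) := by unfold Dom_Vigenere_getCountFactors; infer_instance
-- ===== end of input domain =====

-- B differs from A in structure only (peel-off loop instead of seen-list + rescan); same value on every input.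

-- ===== PORT A =====
-- A: fold over factors with state (factorFreq, alreadyParsed); for each unseen item,
-- an inner fold over the full list counts its occurrences.
def Vigenere_getCountFactors (factors : List Int) : List (List Int) :=
  (factors.foldl
    (fun (st : List (List Int) × List Int) item =>
      if item ∈ st.2 then st
      else
        let localFreq : Int :=
          factors.foldl (fun acc compare => if item = compare then acc + 1 else acc) 0
        (st.1 ++ [[item, localFreq]], st.2 ++ [item]))
    ([], [])).1

-- ===== PORT B =====
-- B: while rest nonempty — take head k, emit [k, #occurrences of k in rest], drop all k's.
def Vigenere_getCountFactors_alt (factors : List Int) : List (List Int) :=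
  match factors with
  | [] => []
  | x :: xs =>
      [x, (((x :: xs).filter (fun y => y == x)).length : Int)] ::
        Vigenere_getCountFactors_alt (xs.filter (fun y => y ≠ x))
termination_by factors.length
decreasing_by
  simpa using le_trans (List.length_filter_le _ _) (Nat.le_of_eq List.length_attach)

-- ===== PRECONDITION & SPEC =====
def Spec_Vigenere_getCountFactors (factors : List Int) (out : List (List Int)) : Prop := out = Vigenere_getCountFactors_alt factors
instance (factors : List Int) (out : List (List Int)) : Decidable (Spec_Vigenere_getCountFactors factors out) := by unfold Spec_Vigenere_getCountFactors; infer_instance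

-- ===== CLAIM (what is proved, stated in full; the proofs are below) =====
def Claim_equal_Vigenere_getCountFactors : Prop := ∀ (factors : List Int), Dom_Vigenere_getCountFactors factors → Spec_Vigenere_getCountFactors factors (Vigenere_getCountFactors factors)

-- ===== LEMMAS AND PROOFS =====

-- first-seen distinct elements of a list, given an already-seen accumulator
def pvDD (P : List Int) : List Int → List Int
  | [] => []
  | x :: xs => if x ∈ P then pvDD P xs else x :: pvDD (P ++ [x]) xs

-- occurrence count as an Int
def pvCnt (l : List Int) (k : Int) : Int := ((l.filter (fun y => y == k)).length : Int)

theorem pvCnt_cons_self (x : Int) (xs : List Int) : pvCnt (x :: xs) x = pvCnt xs x + 1 := by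
  simp [pvCnt]

theorem pvCnt_cons_ne (x k : Int) (xs : List Int) (h : k ≠ x) :
    pvCnt (x :: xs) k = pvCnt xs k := by
  simp [pvCnt, beq_iff_eq, (Ne.symm h)]

theorem pvCnt_filter_ne (l : List Int) (x k : Int) (h : k ≠ x) :
    pvCnt (l.filter (fun y => y ≠ x)) k = pvCnt l k := by
  induction l with
  | nil => rfl
  | cons a l ih =>
      by_cases hax : a = x
      · subst hax
        simpa [List.filter_cons, pvCnt_cons_ne a k l h] using ih
      · by_cases hak : a = k
        · subst hak
          simp [hax, pvCnt_cons_self] at *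
          omega
        · have hka : k ≠ a := fun hk => hak hk.symm
          rw [List.filter_cons, if_pos (show (fun y => decide (y ≠ x)) a = true by simpa using hax)]
          rw [pvCnt_cons_ne a k _ hka, ih, pvCnt_cons_ne a k l hka]

theorem pvFold_cnt (k : Int) (l : List Int) : ∀ a : Int,
    l.foldl (fun acc c => if k = c then acc + 1 else acc) a = a + pvCnt l k := by
  induction l with
  | nil => intro a; simp [pvCnt]
  | cons x xs ih =>
      intro a
      by_cases h : k = x
      · subst h; simp [List.foldl_cons, ih, pvCnt_cons_self]; omega
      · simp [List.foldl_cons, h, ih, pvCnt_cons_ne x k xs h]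

-- the fold in A, closed form: new keys appended in first-seen order, each with its full count
theorem pvFoldA (full : List Int) : ∀ (xs : List Int) (F : List (List Int)) (P : List Int),
    (xs.foldl
      (fun (st : List (List Int) × List Int) item =>
        if item ∈ st.2 then st
        else
          let localFreq : Int :=
            full.foldl (fun acc compare => if item = compare then acc + 1 else acc) 0
          (st.1 ++ [[item, localFreq]], st.2 ++ [item]))
      (F, P))
    = (F ++ (pvDD P xs).map (fun k => [k, pvCnt full k]), P ++ pvDD P xs) := by
  intro xs
  induction xs with
  | nil => intro F P; simp [pvDD]
  | cons x xs ih =>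
      intro F P
      by_cases h : x ∈ P
      · simp [List.foldl_cons, h, pvDD, ih]
      · simp only [List.foldl_cons, if_neg h]
        rw [ih]
        simp [pvDD, h, pvFold_cnt x full 0, List.append_assoc]

theorem pvA_closed (l : List Int) :
    Vigenere_getCountFactors l = (pvDD [] l).map (fun k => [k, pvCnt l k]) := by
  unfold Vigenere_getCountFactors
  rw [pvFoldA l l [] []]
  simp

theorem pvDD_mem {k : Int} : ∀ {xs P : List Int}, k ∈ pvDD P xs → k ∈ xs := by
  intro xs
  induction xs with
  | nil => intro P h; simp [pvDD] at h
  | cons x xs ih =>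
      intro P h
      by_cases hx : x ∈ P
      · simp [pvDD, hx] at h
        exact List.mem_cons_of_mem _ (ih h)
      · simp [pvDD, hx] at h
        rcases h with h | h
        · simp [h]
        · exact List.mem_cons_of_mem _ (ih h)

theorem pvDD_seen_congr : ∀ (xs P P' : List Int), (∀ y ∈ xs, (y ∈ P' ↔ y ∈ P)) →
    pvDD P' xs = pvDD P xs := by
  intro xs
  induction xs with
  | nil => intro P P' _; rfl
  | cons x xs ih =>
      intro P P' h
      have hx := h x (List.mem_cons_self ..)
      by_cases hxP : x ∈ P
      · have hxP' : x ∈ P' := hx.mpr hxP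
        simp only [pvDD, if_pos hxP, if_pos hxP']
        exact ih P P' (fun y hy => h y (List.mem_cons_of_mem _ hy))
      · have hxP' : x ∉ P' := fun hc => hxP (hx.mp hc)
        simp only [pvDD, if_neg hxP, if_neg hxP']
        congr 1
        exact ih (P ++ [x]) (P' ++ [x]) (by
          intro y hy
          simp [h y (List.mem_cons_of_mem _ hy)])

theorem pvDD_filter_seen : ∀ (xs P : List Int) (x : Int), x ∈ P →
    pvDD P (xs.filter (fun y => y ≠ x)) = pvDD P xs := by
  intro xs
  induction xs with
  | nil => intro P x _; rfl
  | cons a xs ih =>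
      intro P x hx
      by_cases hax : a = x
      · subst hax
        have h1 : (a :: xs).filter (fun y => y ≠ a) = xs.filter (fun y => y ≠ a) := by simp
        rw [h1, ih P a hx]
        simp [pvDD, hx]
      · simp only [List.filter_cons, decide_eq_true_eq]
        rw [if_pos (by exact hax)]
        by_cases haP : a ∈ P
        · simp only [pvDD, if_pos haP]
          exact ih P x hx
        · simp only [pvDD, if_neg haP]
          congr 1
          exact ih (P ++ [a]) x (List.mem_append_left _ hx)

theorem pvB_closed : ∀ (n : ℕ) (l : List Int), l.length ≤ n →
    Vigenere_getCountFactors_alt l = (pvDD [] l).map (fun k => [k, pvCnt l k]) := by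
  intro n
  induction n with
  | zero =>
      intro l hl
      have : l = [] := List.length_eq_zero_iff.mp (Nat.le_zero.mp hl)
      subst this
      simp [Vigenere_getCountFactors_alt, pvDD]
  | succ n ih =>
      intro l hl
      match l with
      | [] =>
          simp [Vigenere_getCountFactors_alt, pvDD]
      | x :: xs =>
          have hlen : (xs.filter (fun y => y ≠ x)).length ≤ n :=
            le_trans (List.length_filter_le _ _) (Nat.le_of_succ_le_succ hl)
          simp only [Vigenere_getCountFactors_alt]
          rw [ih _ hlen]
          have hdd : pvDD [] (xs.filter (fun y => y ≠ x)) = pvDD [x] xs := by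
            rw [pvDD_seen_congr (xs.filter (fun y => y ≠ x)) [x] []
              (by intro y hy; simp at hy; simp [hy.2])]
            exact pvDD_filter_seen xs [x] x (by simp)
          have hdd2 : pvDD [] (x :: xs) = x :: pvDD [x] xs := by
            simp [pvDD]
          rw [hdd, hdd2]
          simp only [List.map_cons, List.cons.injEq]
          constructor
          · simp [pvCnt]
          · apply List.map_congr_left
            intro k hk
            have hkx : k ≠ x := by
              have := pvDD_mem (k := k) (P := [x]) hk
              -- k came from pvDD [x] xs = pvDD [] (filtered xs); get k ≠ x from the filter
              have hk' : k ∈ pvDD [] (xs.filter (fun y => y ≠ x)) := hdd ▸ hk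
              have := pvDD_mem (k := k) hk'
              simp at this
              exact this.2
            rw [pvCnt_filter_ne xs x k hkx, pvCnt_cons_ne x k xs hkx]

-- ===== VERDICT (by name: the statement is the Claim_ definition above) =====
theorem Vigenere_getCountFactors_spec : Claim_equal_Vigenere_getCountFactors := by
  intro factors _
  unfold Spec_Vigenere_getCountFactors
  rw [pvA_closed, pvB_closed factors.length factors le_rfl]
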